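-- pv_equiv track=rewrite | github.com/WencaiCheng/IMPACT-Z | utilities/lattice_parser/lattice_parser.py | _delete_redundant_comma
-- ===== SOURCE A (Python) =====
-- def _delete_redundant_comma(lines):
--     '''
--     delete all redundant comma,
--     delete quatation marks in each line.
--     '''
--     j = 0
--     for line in lines:
--         # rpn expression expand, change here
--         # remove quatation marks in line, '..' and "..."
--         line = line.replace('\'','').replace('\"','')
--
--         # remove rebundant comma
--         tmplist = line.split(',')
--
--         # remove all the '' in tmplist
--         while '' in tmplist:
--             tmplist.remove('')
--
--         # replace lines[j] with no-redundant comma string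
--         lines[j] = ','.join( tmplist)
--         j += 1
--
--     return lines
-- ===== SOURCE B (Python) =====
-- def _delete_redundant_comma(lines):
--     '''
--     Single char-level pass per line: skip quote characters, collapse comma
--     runs and drop leading/trailing commas while copying, instead of
--     split -> filter empties -> join.  Mutates lines in place like A.
--     '''
--     for j, line in enumerate(lines):
--         out = []
--         pending = False
--         for ch in line:
--             if ch == "'" or ch == '"':
--                 continue
--             if ch == ',':
--                 pending = True
--             else:
--                 if pending and out:
--                     out.append(',')
--                 out.append(ch)
--                 pending = False
--         lines[j] = ''.join(out)
--     return lines
-- ===== Notes on version B (the rewrite author's own statement) =====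
-- stated objective: alternative
-- what changed: Replaces A's per-line split-on-comma, repeated remove('') loop and join with a single character-level pass that skips quote characters, collapses comma runs and drops leading/trailing commas while copying.
import Mathlib
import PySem

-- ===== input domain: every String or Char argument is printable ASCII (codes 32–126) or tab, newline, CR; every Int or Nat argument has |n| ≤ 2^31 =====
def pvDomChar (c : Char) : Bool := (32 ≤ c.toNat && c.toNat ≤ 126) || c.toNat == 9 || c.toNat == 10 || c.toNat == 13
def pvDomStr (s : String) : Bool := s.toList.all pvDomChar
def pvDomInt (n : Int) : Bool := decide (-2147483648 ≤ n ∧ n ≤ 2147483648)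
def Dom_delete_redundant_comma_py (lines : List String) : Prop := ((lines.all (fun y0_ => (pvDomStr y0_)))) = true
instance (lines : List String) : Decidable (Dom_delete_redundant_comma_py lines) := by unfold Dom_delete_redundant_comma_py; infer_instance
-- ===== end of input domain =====

-- B replaces A's split → remove-empties loop → join by a single character-level
-- pass per line (skip quotes, collapse comma runs, drop edge commas); same cost,
-- different traversal.  Both A and B mutate `lines` in place in Python; the
-- equivalence proved here is about the returned list of strings.

-- ===== PORT A =====
-- Python: `while '' in tmplist: tmplist.remove('')` — remove deletes the FIRST
-- occurrence, which is List.erase under DecidableEq.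
def pvRemoveEmptyLoop (l : List (List Char)) : List (List Char) :=
  if h : [] ∈ l then pvRemoveEmptyLoop (l.erase []) else l
termination_by l.length
decreasing_by
  have h1 := List.length_erase_of_mem h
  have h2 := List.length_pos_of_mem h
  omega

-- per line: line.replace('\'','').replace('\"','') ; tmplist = line.split(',') ;
-- while '' in tmplist: tmplist.remove('') ; lines[j] = ','.join(tmplist)
def delete_redundant_comma_py (lines : List String) : List String :=
  lines.map (fun line =>
    String.mk (PySem.Chars.join [','] (pvRemoveEmptyLoop (PySem.Chars.splitOn
      (PySem.Chars.replace (PySem.Chars.replace line.toList ['\''] []) ['"'] []) [',']))))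

-- ===== PORT B =====
-- state = (out, pending): the chars emitted so far and whether a comma is pending
def pvStep (st : List Char × Bool) (c : Char) : List Char × Bool :=
  if c = '\'' ∨ c = '"' then st
  else if c = ',' then (st.1, true)
  else ((st.1 ++ (if st.2 ∧ st.1 ≠ [] then [','] else [])) ++ [c], false)

def delete_redundant_comma_py_alt (lines : List String) : List String :=
  lines.map (fun line => String.mk (line.toList.foldl pvStep ([], false)).1)

-- ===== PRECONDITION & SPEC =====
def Spec_delete_redundant_comma_py (lines : List String) (out : List String) : Prop := out = delete_redundant_comma_py_alt lines
instance (lines : List String) (out : List String) : Decidable (Spec_delete_redundant_comma_py lines out) := by unfold Spec_delete_redundant_comma_py; infer_instance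

-- ===== CLAIM (what is proved, stated in full; the proofs are below) =====
def Claim_equal_delete_redundant_comma_py : Prop := ∀ (lines : List String), Dom_delete_redundant_comma_py lines → Spec_delete_redundant_comma_py lines (delete_redundant_comma_py lines)

-- ===== LEMMAS AND PROOFS =====

-- replace with a one-char pattern and empty replacement is a filter
lemma pv_replace_go (q : Char) : ∀ (fuel : Nat) (l acc : List Char), l.length ≤ fuel →
    PySem.Chars.replace.go [q] [] fuel l acc = acc.reverse ++ l.filter (· ≠ q) := by
  intro fuel
  induction fuel with
  | zero =>
    intro l acc h
    have : l = [] := by cases l <;> simp_all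
    subst this
    simp [PySem.Chars.replace.go]
  | succ n ih =>
    intro l acc h
    cases l with
    | nil => simp [PySem.Chars.replace.go]
    | cons c t =>
      by_cases hc : c = q
      · subst hc
        have hp : List.isPrefixOf [c] (c :: t) = true := by simp [List.isPrefixOf]
        simp only [PySem.Chars.replace.go, hp, if_pos]
        rw [show List.drop [c].length (c :: t) = t from by simp,
            show ([] : List Char).reverse ++ acc = acc from by simp]
        rw [ih t acc (by simpa using h)]
        simp
      · have hp : List.isPrefixOf [q] (c :: t) = false := by
          simp [List.isPrefixOf]; exact fun hqc => hc hqc.symm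
        simp only [PySem.Chars.replace.go, hp]
        rw [ih t (c :: acc) (by simpa using h)]
        simp [hc]

lemma pv_replace_single (cs : List Char) (q : Char) :
    PySem.Chars.replace cs [q] [] = cs.filter (· ≠ q) := by
  have h := pv_replace_go q cs.length cs [] le_rfl
  simpa [PySem.Chars.replace] using h

-- split on ',' as a plain structural recursion
def pvSplitC : List Char → List (List Char)
  | [] => [[]]
  | c :: cs => if c = ',' then [] :: pvSplitC cs else (pvSplitC cs).modifyHead (c :: ·)

lemma pv_modifyHead_id {α : Type} (l : List α) : List.modifyHead (fun x => x) l = l := by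
  cases l <;> simp

lemma pvSplitC_ne_nil (cs : List Char) : pvSplitC cs ≠ [] := by
  cases cs with
  | nil => simp [pvSplitC]
  | cons c t =>
    simp only [pvSplitC]
    split
    · simp
    · cases h : pvSplitC t with
      | nil => exact absurd h (pvSplitC_ne_nil t)
      | cons a b => simp

lemma pv_splitOn_go : ∀ (fuel : Nat) (l cur acc : List Char) (accs : List (List Char)),
    l.length ≤ fuel →
    PySem.Chars.splitOn.go [','] fuel l cur accs = accs.reverse ++ (pvSplitC l).modifyHead (cur.reverse ++ ·) := by
  intro fuel
  induction fuel with
  | zero =>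
    intro l cur acc accs h
    have : l = [] := by cases l <;> simp_all
    subst this
    simp [PySem.Chars.splitOn.go, pvSplitC]
  | succ n ih =>
    intro l cur acc accs h
    cases l with
    | nil => simp [PySem.Chars.splitOn.go, pvSplitC]
    | cons c t =>
      by_cases hc : c = ','
      · subst hc
        have hp : List.isPrefixOf [','] (',' :: t) = true := by simp [List.isPrefixOf]
        simp only [PySem.Chars.splitOn.go, hp, if_pos]
        rw [show List.drop [','].length (',' :: t) = t from by simp]
        rw [ih t [] [] (cur.reverse :: accs) (by simpa using h)]
        simp [pvSplitC, pv_modifyHead_id]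
      · have hp : List.isPrefixOf [','] (c :: t) = false := by
          simp [List.isPrefixOf]; exact fun hqc => hc hqc.symm
        simp only [PySem.Chars.splitOn.go, hp]
        rw [ih t (c :: cur) [] accs (by simpa using h)]
        simp only [pvSplitC, if_neg hc]
        obtain ⟨a, b, hab⟩ : ∃ a b, pvSplitC t = a :: b := by
          cases hx : pvSplitC t with
          | nil => exact absurd hx (pvSplitC_ne_nil t)
          | cons a b => exact ⟨a, b, rfl⟩
        simp [hab]

lemma pv_splitOn_comma (cs : List Char) :
    PySem.Chars.splitOn cs [','] = pvSplitC cs := by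
  have := pv_splitOn_go (cs.length + 1) cs [] [] [] (by omega)
  simpa [PySem.Chars.splitOn, pv_modifyHead_id] using this

-- the remove-'' loop is a filter
lemma pv_erase_filter (l : List (List Char)) :
    (l.erase []).filter (· ≠ []) = l.filter (· ≠ []) := by
  induction l with
  | nil => simp
  | cons a t ih =>
    by_cases ha : a = ([] : List Char)
    · subst ha; simp [List.erase_cons]
    · have hbe : (a == ([] : List Char)) = false := by simpa using ha
      rw [List.erase_cons, hbe]
      simp only [Bool.false_eq_true, if_false]
      rw [List.filter_cons, List.filter_cons, ih]

lemma pvRemoveEmptyLoop_eq (l : List (List Char)) :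
    pvRemoveEmptyLoop l = l.filter (· ≠ []) := by
  induction l using pvRemoveEmptyLoop.induct with
  | case1 l h ih =>
    rw [pvRemoveEmptyLoop, dif_pos h, ih, pv_erase_filter]
  | case2 l h =>
    rw [pvRemoveEmptyLoop, dif_neg h]
    exact (List.filter_eq_self.2 (fun a ha => by
      simp only [ne_eq, decide_eq_true_eq]
      exact fun he => h (he ▸ ha))).symm

-- the single-pass scan of B, as recursion (R: nothing emitted yet; Q: emitted, no pending comma)
mutual
def pvScanR : List Char → List Char
  | [] => []
  | c :: cs =>
    if c = '\'' ∨ c = '"' then pvScanR cs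
    else if c = ',' then pvScanR cs
    else c :: pvScanQ cs
def pvScanQ : List Char → List Char
  | [] => []
  | c :: cs =>
    if c = '\'' ∨ c = '"' then pvScanQ cs
    else if c = ',' then (if pvScanR cs = [] then [] else ',' :: pvScanR cs)
    else c :: pvScanQ cs
end

lemma pv_fold (cs : List Char) : ∀ (out : List Char) (pend : Bool),
    (cs.foldl pvStep (out, pend)).1 =
      out ++ (if out = [] then pvScanR cs
              else if pend then (if pvScanR cs = [] then [] else ',' :: pvScanR cs)
              else pvScanQ cs) := by
  induction cs with
  | nil => intro out pend; cases pend <;> by_cases h : out = [] <;> simp [h, pvScanR, pvScanQ]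
  | cons c cs ih =>
    intro out pend
    by_cases hq : c = '\'' ∨ c = '"'
    · simp only [List.foldl_cons, pvStep, if_pos hq, pvScanR, pvScanQ, ih]
    · by_cases hc : c = ','
      · subst hc
        simp only [List.foldl_cons, pvStep, if_neg hq, if_pos rfl, ih]
        by_cases h : out = [] <;> cases pend <;> simp [h, pvScanR, pvScanQ, hq]
      · simp only [List.foldl_cons, pvStep, if_neg hq, if_neg hc]
        by_cases h : out = []
        · subst h
          rw [ih]
          simp [pvScanR, pvScanQ, hq, hc]
        · rw [ih]
          have hne : (out ++ (if pend = true ∧ ¬out = [] then [','] else [])) ++ [c] ≠ [] := by simp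
          cases pend
          · simp [h, pvScanR, pvScanQ, hq, hc]
          · simp [h, hne, pvScanR, pvScanQ, hq, hc]

-- spec-side joins
def pvJ (parts : List (List Char)) : List Char := PySem.Chars.join [','] (parts.filter (· ≠ []))
def pvJ' (parts : List (List Char)) : List Char :=
  parts.headI ++ (if pvJ parts.tail = [] then [] else ',' :: pvJ parts.tail)

lemma pvJ_eq_nil_iff (parts : List (List Char)) :
    pvJ parts = [] ↔ parts.filter (· ≠ []) = [] := by
  unfold pvJ
  cases h : parts.filter (· ≠ []) with
  | nil => simp [PySem.Chars.join, List.intercalate]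
  | cons a t =>
    have hmem : a ∈ parts.filter (· ≠ []) := by rw [h]; exact List.mem_cons_self
    have ha : a ≠ [] := by have := List.of_mem_filter hmem; simpa using this
    constructor
    · intro hj
      exfalso
      cases t with
      | nil =>
        rw [PySem.Chars.join_singleton] at hj
        exact ha hj
      | cons b t' =>
        rw [PySem.Chars.join_cons_cons] at hj
        cases a <;> simp_all
    · intro hx; simp at hx

lemma pvJ_cons_ne (a : List Char) (t : List (List Char)) (ha : a ≠ []) :
    pvJ (a :: t) = a ++ (if pvJ t = [] then [] else ',' :: pvJ t) := by
  unfold pvJ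
  rw [List.filter_cons_of_pos (by simpa using ha)]
  by_cases h : pvJ t = []
  · have hf := (pvJ_eq_nil_iff t).1 h
    rw [hf, PySem.Chars.join_singleton]
    simp [PySem.Chars.join, List.intercalate]
  · have hne : t.filter (· ≠ []) ≠ [] := fun hx => h ((pvJ_eq_nil_iff t).2 hx)
    cases hx : t.filter (· ≠ []) with
    | nil => exact absurd hx hne
    | cons b t' =>
      unfold pvJ at h
      rw [hx] at h
      rw [if_neg h, PySem.Chars.join_cons_cons]
      simp

-- the quote filter both programs apply
def pvQF (cs : List Char) : List Char := cs.filter (fun c => !(c == '\'') && !(c == '"'))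

lemma pv_scan_eq (cs : List Char) :
    pvScanR cs = pvJ (pvSplitC (pvQF cs)) ∧ pvScanQ cs = pvJ' (pvSplitC (pvQF cs)) := by
  induction cs with
  | nil => simp [pvScanR, pvScanQ, pvQF, pvSplitC, pvJ, pvJ', PySem.Chars.join, List.intercalate]
  | cons c cs ih =>
    obtain ⟨ihR, ihQ⟩ := ih
    by_cases hq : c = '\'' ∨ c = '"'
    · have : pvQF (c :: cs) = pvQF cs := by
        rcases hq with h | h <;> subst h <;> simp [pvQF]
      rw [this] at *
      constructor
      · rw [pvScanR, if_pos hq]; exact ihR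
      · rw [pvScanQ, if_pos hq]; exact ihQ
    · have hqf : pvQF (c :: cs) = c :: pvQF cs := by
        have h1 : (c == '\'') = false := by simp; exact fun h => hq (Or.inl h)
        have h2 : (c == '"') = false := by simp; exact fun h => hq (Or.inr h)
        simp [pvQF, h1, h2]
      rw [hqf]
      obtain ⟨a, t, hat⟩ : ∃ a t, pvSplitC (pvQF cs) = a :: t := by
        cases hx : pvSplitC (pvQF cs) with
        | nil => exact absurd hx (pvSplitC_ne_nil _)
        | cons a b => exact ⟨a, b, rfl⟩
      by_cases hc : c = ','
      · subst hc
        have hs : pvSplitC (',' :: pvQF cs) = [] :: pvSplitC (pvQF cs) := by simp [pvSplitC]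
        rw [hs]
        have hRnil : pvScanR cs = [] ↔ pvJ (pvSplitC (pvQF cs)) = [] := by rw [ihR]
        constructor
        · rw [pvScanR, if_neg hq, if_pos rfl, ihR]
          unfold pvJ
          simp
        · rw [pvScanQ, if_neg hq, if_pos rfl]
          unfold pvJ'
          simp only [List.headI, List.tail]
          rw [ihR]
          simp
      · have hs : pvSplitC (c :: pvQF cs) = (c :: a) :: t := by
          simp [pvSplitC, hc, hat]
        rw [hs]
        have key : pvJ ((c :: a) :: t) = c :: pvJ' (a :: t) := by
          rw [pvJ_cons_ne _ _ (by simp)]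
          unfold pvJ'
          simp
        have key' : pvJ' ((c :: a) :: t) = c :: pvJ' (a :: t) := by
          unfold pvJ'
          simp
        constructor
        · rw [pvScanR, if_neg hq, if_neg hc, key, ihQ, hat]
        · rw [pvScanQ, if_neg hq, if_neg hc, key', ihQ, hat]

-- per-line equality
lemma pv_line_eq (cs : List Char) :
    PySem.Chars.join [','] (pvRemoveEmptyLoop (PySem.Chars.splitOn
      (PySem.Chars.replace (PySem.Chars.replace cs ['\''] []) ['"'] []) [','])) =
    (cs.foldl pvStep ([], false)).1 := by
  rw [pv_replace_single, pv_replace_single, pv_splitOn_comma, pvRemoveEmptyLoop_eq]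
  have hqf : (cs.filter (· ≠ '\'')).filter (· ≠ '"') = pvQF cs := by
    rw [List.filter_filter]
    unfold pvQF
    apply List.filter_congr
    intro a _
    by_cases h1 : a = '\'' <;> by_cases h2 : a = '"' <;> simp [h1, h2]
  rw [hqf, pv_fold cs [] false]
  simp only [if_pos rfl, List.nil_append]
  exact ((pv_scan_eq cs).1).symm

-- ===== VERDICT (by name: the statement is the Claim_ definition above) =====
theorem delete_redundant_comma_py_spec : Claim_equal_delete_redundant_comma_py := by
  intro lines _
  unfold Spec_delete_redundant_comma_py delete_redundant_comma_py delete_redundant_comma_py_alt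
  apply List.map_congr_left
  intro line _
  rw [pv_line_eq]
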